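-- pv_equiv track=rewrite | github.com/jlanversin/ONIX | onix/nax/functions.py | locate_batch_break
-- ===== SOURCE A (Python) =====
-- def locate_batch_break(history_matrix_list):
--
--     index_list = []
--     index = -1
--     for batch_solution_matrix in history_matrix_list:
--         if index != -1:
--             #index_list.append(index-1)
--             index_list.append(index)
--         for fluence_points in batch_solution_matrix[1]:
--             for fluence in fluence_points:
--                 index  += 1
--
--     # add the before last index
--     index_list = index_list + [index-1]
--
--     return index_list
-- ===== SOURCE B (Python) =====
-- def locate_batch_break(history_matrix_list):
--     counts = [sum(len(fp) for fp in batch[1]) for batch in history_matrix_list]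
--     boundaries = []
--     running = 0
--     for c in counts[:-1]:
--         running += c
--         boundaries.append(running - 1)
--     # the before-last fluence index overall
--     return boundaries + [sum(counts) - 2]
-- ===== Notes on version B (the rewrite author's own statement) =====
-- stated objective: simpler
-- what changed: B replaces A's fused stateful loop (sentinel index -1, conditional append at each batch start) by per-batch element counts and one running prefix-sum pass that records every batch boundary; Pre_ excludes inputs where a batch has fewer than two rows, on which both A and B raise IndexError at batch[1].
-- intended difference: On inputs with at least two batches whose first batch contributes zero fluence elements, A's reuse of -1 both as a not-started sentinel and as the running index silently drops the boundary entries of the zero prefixes (e.g. returning [-1] for [[[],[]],[[],[[0]]]]), while B records a boundary at every batch break (returning [-1, -1]), which is the intended boundary-per-break list. — e.g. on locate_batch_break([[[], []], [[], [[0]]]]): A returns [-1], B returns [-1, -1]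
import Mathlib
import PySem

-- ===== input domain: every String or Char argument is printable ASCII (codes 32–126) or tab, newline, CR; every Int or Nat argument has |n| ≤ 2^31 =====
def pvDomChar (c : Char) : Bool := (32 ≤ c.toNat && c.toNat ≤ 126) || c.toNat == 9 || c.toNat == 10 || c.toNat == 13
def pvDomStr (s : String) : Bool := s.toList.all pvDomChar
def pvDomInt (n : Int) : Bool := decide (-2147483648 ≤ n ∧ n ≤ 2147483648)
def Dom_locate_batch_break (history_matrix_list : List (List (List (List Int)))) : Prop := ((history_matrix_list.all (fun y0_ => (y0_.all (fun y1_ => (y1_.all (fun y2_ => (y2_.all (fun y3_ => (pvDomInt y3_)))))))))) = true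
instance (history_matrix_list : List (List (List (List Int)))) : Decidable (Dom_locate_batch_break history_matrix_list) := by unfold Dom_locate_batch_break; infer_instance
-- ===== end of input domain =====

-- B replaces A's fused stateful loop by per-batch counts plus a running prefix sum;
-- objective: simpler.  An intended difference (D_ below): A's -1 sentinel accidentally
-- drops boundaries after leading empty batches.

-- ===== PORT A =====
-- batch_solution_matrix[1] raises IndexError when a batch has fewer than 2 rows;
-- Pre_ excludes that, so the `.getD []` default is never reached inside Pre_.
def locate_batch_break (history_matrix_list : List (List (List (List Int)))) : List Int :=
  let st := history_matrix_list.foldl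
    (fun (st : List Int × Int) batch_solution_matrix =>
      let index_list := if st.2 ≠ -1 then st.1 ++ [st.2] else st.1
      let index := ((PySem.List.pyGet? batch_solution_matrix 1).getD []).foldl
        (fun i fluence_points => fluence_points.foldl (fun j _ => j + 1) i) st.2
      (index_list, index))
    ([], -1)
  st.1 ++ [st.2 - 1]

-- ===== PORT B =====
-- sum(len(fp) for fp in batch[1]); same IndexError corner excluded by Pre_.
def pvCount (batch : List (List (List Int))) : Int :=
  ((PySem.List.pyGet? batch 1).getD []).foldl (fun s fp => s + (fp.length : Int)) 0

def locate_batch_break_alt (history_matrix_list : List (List (List (List Int)))) : List Int :=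
  let counts := history_matrix_list.map pvCount
  -- for c in counts[:-1]: running += c; boundaries.append(running - 1)
  let st := counts.dropLast.foldl
    (fun (st : List Int × Int) c => (st.1 ++ [st.2 + c - 1], st.2 + c)) ([], 0)
  st.1 ++ [counts.sum - 2]

-- ===== PRECONDITION & SPEC =====
-- Pre_ excludes exactly the inputs where Python A (and B) raise IndexError:
-- some batch has fewer than two entries, so batch[1] fails.
def Pre_locate_batch_break (history_matrix_list : List (List (List (List Int)))) : Prop :=
  ∀ b ∈ history_matrix_list, 2 ≤ b.length
instance (history_matrix_list : List (List (List (List Int)))) : Decidable (Pre_locate_batch_break history_matrix_list) := by unfold Pre_locate_batch_break; infer_instance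

def pvWitness_locate_batch_break : List (List (List (List Int))) := [[[], [[1, 2]]]]

-- On inputs with ≥ 2 batches whose FIRST batch contributes zero fluence elements, A's
-- reuse of -1 both as a not-started sentinel and as the running index accidentally drops
-- the boundary entries of the zero prefixes, returning a shorter list; B records the
-- boundary at every batch break, which is the intended boundary list.
def D_locate_batch_break (history_matrix_list : List (List (List (List Int)))) : Prop :=
  history_matrix_list.drop 1 ≠ [] ∧
    ∀ fp ∈ ((history_matrix_list.headD []).drop 1).headD [], fp = ([] : List Int)
instance (history_matrix_list : List (List (List (List Int)))) : Decidable (D_locate_batch_break history_matrix_list) := by unfold D_locate_batch_break; infer_instance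

def Spec_locate_batch_break (history_matrix_list : List (List (List (List Int)))) (out : List Int) : Prop := ¬ D_locate_batch_break history_matrix_list → out = locate_batch_break_alt history_matrix_list
instance (history_matrix_list : List (List (List (List Int)))) (out : List Int) : Decidable (Spec_locate_batch_break history_matrix_list out) := by unfold Spec_locate_batch_break; infer_instance

def pvDiffWitness_locate_batch_break : List (List (List (List Int))) := [[[], []], [[], [[0]]]]
def pvDiffWitnessOut_locate_batch_break : (List Int) × (List Int) := ([-1], [-1, -1])

-- ===== CLAIM (what is proved, stated in full; the proofs are below) =====
def Claim_unchanged_locate_batch_break : Prop := ∀ (history_matrix_list : List (List (List (List Int)))), Dom_locate_batch_break history_matrix_list → Pre_locate_batch_break history_matrix_list → Spec_locate_batch_break history_matrix_list (locate_batch_break history_matrix_list)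
def Claim_changed_locate_batch_break : Prop := Dom_locate_batch_break (pvDiffWitness_locate_batch_break) ∧ Pre_locate_batch_break (pvDiffWitness_locate_batch_break) ∧ D_locate_batch_break (pvDiffWitness_locate_batch_break) ∧ locate_batch_break (pvDiffWitness_locate_batch_break) = pvDiffWitnessOut_locate_batch_break.1 ∧ locate_batch_break_alt (pvDiffWitness_locate_batch_break) = pvDiffWitnessOut_locate_batch_break.2 ∧ pvDiffWitnessOut_locate_batch_break.1 ≠ pvDiffWitnessOut_locate_batch_break.2
def Claim_exact_locate_batch_break : Prop := ∀ (history_matrix_list : List (List (List (List Int)))), Dom_locate_batch_break history_matrix_list → Pre_locate_batch_break history_matrix_list → D_locate_batch_break history_matrix_list → locate_batch_break history_matrix_list ≠ locate_batch_break_alt history_matrix_list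

-- ===== LEMMAS AND PROOFS =====

-- the boundary list A's loop accumulates, as a function of the per-batch counts
def pvBoundaries (idx : Int) : List Int → List Int
  | [] => []
  | c :: cs => (if idx ≠ -1 then [idx] else []) ++ pvBoundaries (idx + c) cs

-- the boundary list B's running-total loop accumulates
def pvRun (r : Int) : List Int → List Int
  | [] => []
  | c :: cs => (r + c - 1) :: pvRun (r + c) cs

-- A's boundary list once the sentinel is a real index (emitted on ENTERING a batch)
def pvEnter (r : Int) : List Int → List Int
  | [] => []
  | c :: cs => (r - 1) :: pvEnter (r + c) cs

theorem pv_foldl_len (fp : List Int) (i : Int) :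
    fp.foldl (fun j _ => j + 1) i = i + fp.length := by
  induction fp generalizing i with
  | nil => simp
  | cons a t ih => simp [List.foldl, ih]; ring

theorem pv_foldl_shift (b1 : List (List Int)) (x : Int) :
    b1.foldl (fun s fp => s + (fp.length : Int)) x
      = x + b1.foldl (fun s fp => s + (fp.length : Int)) 0 := by
  induction b1 generalizing x with
  | nil => simp
  | cons a t ih => simp only [List.foldl]; rw [ih, ih ((0:Int) + a.length)]; ring

theorem pv_inner (b1 : List (List Int)) (i : Int) :
    b1.foldl (fun i fp => fp.foldl (fun j _ => j + 1) i) i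
      = i + b1.foldl (fun s fp => s + (fp.length : Int)) 0 := by
  induction b1 generalizing i with
  | nil => simp
  | cons a t ih =>
    simp only [List.foldl]
    rw [pv_foldl_len, ih, pv_foldl_shift t ((0:Int) + a.length)]
    ring

theorem pv_A_char (l : List (List (List (List Int)))) (il : List Int) (idx : Int) :
    l.foldl
      (fun (st : List Int × Int) batch =>
        let index_list := if st.2 ≠ -1 then st.1 ++ [st.2] else st.1
        let index := ((PySem.List.pyGet? batch 1).getD []).foldl
          (fun i fp => fp.foldl (fun j _ => j + 1) i) st.2
        (index_list, index))
      (il, idx)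
    = (il ++ pvBoundaries idx (l.map pvCount), idx + (l.map pvCount).sum) := by
  induction l generalizing il idx with
  | nil => simp [pvBoundaries]
  | cons b t ih =>
    simp only [List.foldl, List.map, pvBoundaries, List.sum_cons]
    rw [pv_inner, ih]
    simp only [Prod.mk.injEq]
    refine ⟨?_, ?_⟩
    · by_cases h : idx = -1 <;> simp [h, pvCount]
    · simp only [pvCount]; ring

theorem pv_B_char (cs : List Int) (il : List Int) (r : Int) :
    cs.foldl (fun (st : List Int × Int) c => (st.1 ++ [st.2 + c - 1], st.2 + c)) (il, r)
      = (il ++ pvRun r cs, r + cs.sum) := by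
  induction cs generalizing il r with
  | nil => simp [pvRun]
  | cons c t ih => simp only [List.foldl, pvRun, List.sum_cons]; rw [ih]; simp; ring

theorem pv_count_sum (b1 : List (List Int)) :
    b1.foldl (fun s fp => s + (fp.length : Int)) 0
      = (b1.map (fun fp => (fp.length : Int))).sum := by
  induction b1 with
  | nil => simp
  | cons a t ih => simp only [List.foldl, List.map, List.sum_cons]; rw [pv_foldl_shift, ih]; ring

theorem pv_count_nonneg (b : List (List (List Int))) : 0 ≤ pvCount b := by
  unfold pvCount
  rw [pv_count_sum]
  exact List.sum_nonneg (by intro x hx; simp at hx; obtain ⟨fp, _, rfl⟩ := hx; positivity)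

-- once the index is a genuine (nonnegative) prefix, A emits at every batch entry
theorem pv_enter_eq (cs : List Int) (r : Int) (hr : 1 ≤ r) (hcs : ∀ c ∈ cs, 0 ≤ c) :
    pvBoundaries (r - 1) cs = pvEnter r cs := by
  induction cs generalizing r with
  | nil => simp [pvBoundaries, pvEnter]
  | cons c t ih =>
    have hc : 0 ≤ c := hcs c (by simp)
    have h1 : r - 1 ≠ -1 := by omega
    simp only [pvBoundaries, pvEnter, h1, if_pos, List.singleton_append, List.cons.injEq,
      true_and, ne_eq, not_false_eq_true]
    rw [show r - 1 + c = r + c - 1 by ring]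
    exact ih (r + c) (by omega) (fun x hx => hcs x (by simp [hx]))

theorem pv_enter_run (cs : List Int) (r : Int) :
    pvEnter r cs = if cs = [] then [] else (r - 1) :: pvRun r cs.dropLast := by
  induction cs generalizing r with
  | nil => simp [pvEnter]
  | cons c t ih =>
    cases t with
    | nil => simp [pvEnter, pvRun]
    | cons c' t' =>
      rw [show pvEnter r (c :: c' :: t') = (r - 1) :: pvEnter (r + c) (c' :: t') from rfl,
        ih (r + c)]
      simp only [reduceCtorEq, if_false, List.dropLast_cons₂, pvRun]

theorem pv_boundaries_len (cs : List Int) (idx : Int) :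
    (pvBoundaries idx cs).length ≤ cs.length := by
  induction cs generalizing idx with
  | nil => simp [pvBoundaries]
  | cons c t ih =>
    simp only [pvBoundaries, List.length_append, List.length_cons]
    by_cases h : idx = -1
    · simp only [h, ne_eq, not_true_eq_false, if_false, List.length_nil]
      have := ih ((-1 : Int) + c)
      omega
    · simp only [ne_eq, h, not_false_eq_true, if_true, List.length_singleton]
      have := ih (idx + c)
      omega

theorem pv_run_len (cs : List Int) (r : Int) : (pvRun r cs).length = cs.length := by
  induction cs generalizing r with
  | nil => rfl
  | cons c t ih => simp [pvRun, ih]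

-- pvCount of the head batch, seen through D_'s shape condition
theorem pv_count_head (b : List (List (List Int))) (hb : 2 ≤ b.length)
    (h : ¬ ∀ fp ∈ (b.drop 1).headD [], fp = ([] : List Int)) : 1 ≤ pvCount b := by
  match b, hb with
  | x :: y :: t, _ =>
    push_neg at h
    obtain ⟨fp, hfp, hne⟩ := h
    simp only [List.drop_succ_cons, List.drop_zero, List.headD_cons] at hfp
    unfold pvCount
    have hget : PySem.List.pyGet? (x :: y :: t) 1 = some y := by
      have h := PySem.List.pyGet?_ofNat (x :: y :: t) (n := 1) (by simp)
      simpa using h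
    rw [hget]
    simp only [Option.getD_some]
    rw [pv_count_sum]
    have : (fp.length : Int) ∈ y.map (fun fp => (fp.length : Int)) :=
      List.mem_map_of_mem hfp
    have h1 : 1 ≤ (fp.length : Int) := by
      have : fp.length ≠ 0 := by simpa using hne
      omega
    calc (1 : Int) ≤ (fp.length : Int) := h1
      _ ≤ _ := List.single_le_sum (by
            intro x hx; simp at hx; obtain ⟨g, _, rfl⟩ := hx; positivity) _ this

theorem pv_count_head_zero (b : List (List (List Int))) (hb : 2 ≤ b.length)
    (h : ∀ fp ∈ (b.drop 1).headD [], fp = ([] : List Int)) : pvCount b = 0 := by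
  match b, hb with
  | x :: y :: t, _ =>
    simp only [List.drop_succ_cons, List.drop_zero, List.headD_cons] at h
    unfold pvCount
    have hget : PySem.List.pyGet? (x :: y :: t) 1 = some y := by
      have h := PySem.List.pyGet?_ofNat (x :: y :: t) (n := 1) (by simp)
      simpa using h
    rw [hget]
    simp only [Option.getD_some]
    rw [pv_count_sum]
    apply List.sum_eq_zero
    intro x hx
    simp at hx
    obtain ⟨fp, hfp, rfl⟩ := hx
    simp [h fp hfp]

-- the two boundary lists agree when the first count is positive
theorem pv_start (cs : List Int) (c0 : Int) (h0 : 1 ≤ c0) (hcs : ∀ c ∈ cs, 0 ≤ c) :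
    pvBoundaries (-1) (c0 :: cs) = pvRun 0 (c0 :: cs).dropLast := by
  cases cs with
  | nil => simp [pvBoundaries, pvRun]
  | cons c1 t =>
    rw [pvBoundaries, if_neg (by norm_num), List.nil_append,
      show (-1 : Int) + c0 = c0 - 1 by ring,
      pv_enter_eq _ _ h0 hcs, pv_enter_run, if_neg (by simp),
      List.dropLast_cons₂, pvRun]
    norm_num

-- ===== VERDICT (by name: the statements are the Claim_ definitions above) =====
theorem locate_batch_break_spec : Claim_unchanged_locate_batch_break := by
  intro l _ hpre hnd
  show locate_batch_break l = locate_batch_break_alt l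
  unfold locate_batch_break locate_batch_break_alt
  simp only [pv_A_char, pv_B_char, List.nil_append]
  congr 1
  · -- the boundary lists agree outside D_
    match l with
    | [] => rfl
    | [b] => simp [pvBoundaries, pvRun]
    | b :: b' :: t =>
      have hc0 : 1 ≤ pvCount b := by
        apply pv_count_head b (hpre b (by simp))
        intro hall
        exact hnd ⟨by simp, by simpa using hall⟩
      have hnn : ∀ c ∈ ((b' :: t).map pvCount), 0 ≤ c := by
        intro c hc
        rw [List.mem_map] at hc
        obtain ⟨x, _, rfl⟩ := hc
        exact pv_count_nonneg x
      rw [List.map_cons]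
      exact pv_start _ _ hc0 hnn
  · simp only [List.cons.injEq, and_true]
    ring

theorem locate_batch_break_changed : Claim_changed_locate_batch_break := by
  unfold Claim_changed_locate_batch_break; decide

theorem locate_batch_break_tight : Claim_exact_locate_batch_break := by
  intro l _ hpre hd heq
  obtain ⟨hne, hall⟩ := hd
  match l with
  | [] => exact hne rfl
  | [b] => exact hne rfl
  | b :: b' :: t =>
    have hc0 : pvCount b = 0 :=
      pv_count_head_zero b (hpre b (by simp)) (by simpa using hall)
    have hAlen : (locate_batch_break (b :: b' :: t)).length ≤ t.length + 1 := by
      unfold locate_batch_break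
      rw [pv_A_char]
      simp only [List.nil_append, List.length_append, List.length_cons, List.length_nil,
        List.map_cons]
      have hskip : pvBoundaries (-1) (pvCount b :: pvCount b' :: t.map pvCount)
          = pvBoundaries (-1 + pvCount b') (t.map pvCount) := by
        simp [pvBoundaries, hc0]
      rw [hskip]
      have := pv_boundaries_len (t.map pvCount) (-1 + pvCount b')
      simp only [List.length_map] at this
      omega
    have hBlen : (locate_batch_break_alt (b :: b' :: t)).length = t.length + 2 := by
      unfold locate_batch_break_alt
      simp only [pv_B_char, List.nil_append, List.length_append, List.length_cons,
        List.length_nil, List.map_cons, List.dropLast_cons₂, pv_run_len]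
      simp
    have := congrArg List.length heq
    omega
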